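-- pv_equiv track=rewrite | github.com/Kaniishkodi-2005/HireBot-AI-Assisted-Placement-Communication-Email-Automation-System- | backend/app/services/ai_service.py | _extract_latest_message
-- ===== SOURCE A (Python) =====
-- def _extract_latest_message(email_content: str) -> str:
--     """
--     Extract only the latest message from an email thread.
--     Removes quoted replies (lines starting with >, or content after 'On ... wrote:')
--     """
--     # Split by common email thread markers
--     thread_markers = [
--         '\nOn ',  # "On Mon, Jan 19, 2026 at 2:52 PM"
--         '\n\nOn ',
--         '\n> ',  # Quoted text
--         '\nFrom:',  # Email headers
--         '\n-----Original Message-----',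
--     ]
--
--     # Find the earliest thread marker
--     earliest_pos = len(email_content)
--     for marker in thread_markers:
--         pos = email_content.find(marker)
--         if pos != -1 and pos < earliest_pos:
--             earliest_pos = pos
--
--     # Extract only the content before the thread marker
--     latest_message = email_content[:earliest_pos].strip()
--
--     # Also remove lines that start with '>'
--     lines = latest_message.split('\n')
--     clean_lines = [line for line in lines if not line.strip().startswith('>')]
--     latest_message = '\n'.join(clean_lines).strip()
--
--     return latest_message
-- ===== SOURCE B (Python) =====
-- def _extract_latest_message(email_content: str) -> str:
--     """Single pass over the lines: truncate at the first thread-marker line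
--     (never line 0), drop quoted '>' lines on the way, join and strip."""
--     kept = []
--     for i, line in enumerate(email_content.split('\n')):
--         if i > 0 and line.startswith(('On ', 'From:', '-----Original Message-----', '> ')):
--             break
--         if not line.strip().startswith('>'):
--             kept.append(line)
--     return '\n'.join(kept).strip()
-- ===== Notes on version B (the rewrite author's own statement) =====
-- stated objective: simpler
-- what changed: Replaces the find-earliest-marker-position scan over five substring markers plus slice plus a separate quote-filter pass by a single walk over the lines: split once on newline, stop at the first marker-prefixed line after line 0, skip quoted lines on the way, join and strip.
import Mathlib
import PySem

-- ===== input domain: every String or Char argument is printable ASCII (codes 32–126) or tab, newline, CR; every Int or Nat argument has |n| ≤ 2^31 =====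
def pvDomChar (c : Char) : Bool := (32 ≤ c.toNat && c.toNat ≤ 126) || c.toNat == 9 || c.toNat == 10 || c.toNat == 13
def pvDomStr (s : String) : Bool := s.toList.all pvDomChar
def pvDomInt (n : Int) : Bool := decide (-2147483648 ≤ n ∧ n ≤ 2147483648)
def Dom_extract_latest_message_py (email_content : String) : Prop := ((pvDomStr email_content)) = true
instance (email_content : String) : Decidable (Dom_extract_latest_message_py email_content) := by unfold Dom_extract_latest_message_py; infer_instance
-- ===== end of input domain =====

-- B replaces A's find-earliest-marker scan + slice + separate quote-filter pass by one
-- walk over the split lines (stop at the first marker line after line 0, skip quoted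
-- lines, join, strip); same return value, stated as the equivalence below.


-- ===== PORT A =====
def extract_latest_message_py (email_content : String) : String :=
  let thread_markers : List String :=
    ["\nOn ", "\n\nOn ", "\n> ", "\nFrom:", "\n-----Original Message-----"]
  let earliest_pos : Int := thread_markers.foldl
    (fun earliest_pos marker =>
      let pos := PySem.Str.find email_content marker
      if pos ≠ -1 ∧ pos < earliest_pos then pos else earliest_pos)
    (PySem.Str.len email_content)
  let latest_message := PySem.Str.strip (PySem.Str.slice email_content none (some earliest_pos))
  let lines := (PySem.Str.split? latest_message "\n").getD []
  let clean_lines := lines.filter (fun line => !(PySem.Str.startswith (PySem.Str.strip line) ">"))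
  PySem.Str.strip (PySem.Str.join "\n" clean_lines)

-- ===== PORT B =====
def pvIsMarkerLine (line : String) : Bool :=
  PySem.Str.startswith line "On " || PySem.Str.startswith line "From:" ||
  PySem.Str.startswith line "-----Original Message-----" || PySem.Str.startswith line "> "

def pvKeptLine (line : String) : Bool := !(PySem.Str.startswith (PySem.Str.strip line) ">")

def pvWalk : List String → List String
  | [] => []
  | line :: rest =>
    if pvIsMarkerLine line then []
    else if pvKeptLine line then line :: pvWalk rest
    else pvWalk rest

def extract_latest_message_py_alt (email_content : String) : String :=
  let kept : List String :=
    match (PySem.Str.split? email_content "\n").getD [] with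
    | [] => []
    | line0 :: rest => (if pvKeptLine line0 then [line0] else []) ++ pvWalk rest
  PySem.Str.strip (PySem.Str.join "\n" kept)

-- ===== PRECONDITION & SPEC =====
def Spec_extract_latest_message_py (email_content : String) (out : String) : Prop := out = extract_latest_message_py_alt email_content
instance (email_content : String) (out : String) : Decidable (Spec_extract_latest_message_py email_content out) := by unfold Spec_extract_latest_message_py; infer_instance

-- ===== CLAIM (what is proved, stated in full; the proofs are below) =====
def Claim_equal_extract_latest_message_py : Prop := ∀ (email_content : String), Dom_extract_latest_message_py email_content → Spec_extract_latest_message_py email_content (extract_latest_message_py email_content)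

-- ===== LEMMAS AND PROOFS =====

def pvSplitP : List Char → List Char × List (List Char)
  | [] => ([], [])
  | c :: r =>
    let p := pvSplitP r
    if c = '\n' then ([], p.1 :: p.2) else (c :: p.1, p.2)

theorem pvSplitP_fst (s : List Char) : (pvSplitP s).1 = s.takeWhile (· ≠ '\n') := by
  induction s with
  | nil => rfl
  | cons c r ih =>
    simp only [pvSplitP, List.takeWhile]
    by_cases hc : c = '\n'
    · simp [hc]
    · simp [hc, ih]

theorem pvSplit_go (fuel : Nat) : ∀ (l cur : List Char) (acc : List (List Char)),
    l.length < fuel →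
    PySem.Chars.splitOn.go ['\n'] fuel l cur acc =
      acc.reverse ++ (cur.reverse ++ (pvSplitP l).1) :: (pvSplitP l).2 := by
  induction fuel with
  | zero => intro l cur acc h; omega
  | succ n ih =>
    intro l cur acc h
    cases l with
    | nil =>
      rw [PySem.Chars.splitOn.go.eq_def]
      simp [pvSplitP]
    | cons c rest =>
      rw [PySem.Chars.splitOn.go.eq_def]
      by_cases hc : c = '\n'
      · have hp : List.isPrefixOf ['\n'] (c :: rest) = true := by
          simp [List.isPrefixOf, hc]
        simp only [hp, if_pos, List.length_singleton, List.drop_succ_cons, List.drop_zero]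
        rw [ih rest [] ((cur.reverse) :: acc) (by simpa using Nat.lt_of_succ_lt_succ h)]
        simp [pvSplitP, hc]
      · have hp : List.isPrefixOf ['\n'] (c :: rest) = false := by
          simp [List.isPrefixOf]; intro hh; exact hc hh.symm
        simp only [hp, Bool.false_eq_true, if_false]
        rw [ih rest (c :: cur) acc (by simpa using Nat.lt_of_succ_lt_succ h)]
        simp [pvSplitP, hc]

def pvSplit (s : List Char) : List (List Char) := (pvSplitP s).1 :: (pvSplitP s).2

theorem pvSplit_eq (s : List Char) : PySem.Chars.splitOn s ['\n'] = pvSplit s := by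
  unfold PySem.Chars.splitOn
  rw [pvSplit_go (s.length + 1) s [] [] (by omega)]
  simp [pvSplit]

theorem pvPrefix_takeWhile (m r : List Char) (hm : ∀ c ∈ m, c ≠ '\n') :
    m.isPrefixOf r = m.isPrefixOf (r.takeWhile (· ≠ '\n')) := by
  induction m generalizing r with
  | nil => simp [List.isPrefixOf]
  | cons a m' ih =>
    cases r with
    | nil => simp [List.takeWhile]
    | cons b r' =>
      have ha : a ≠ '\n' := hm a (by simp)
      by_cases hb : b = '\n'
      · simp only [List.takeWhile, hb]
        simp [List.isPrefixOf]
        exact fun hab => absurd hab ha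
      · rw [List.takeWhile_cons_of_pos (by simp [hb])]
        simp [List.isPrefixOf, ih r' (fun c hc => hm c (by simp [hc]))]

theorem pvInfix_drop (sub s : List Char) : sub <:+: s ↔ ∃ j, sub <+: s.drop j := by
  rw [← PySem.Chars.isIn_iff_infix, ← PySem.Chars.exists_prefix_drop_iff_isIn]

theorem pvFind_cons (c : Char) (r sub : List Char) :
    PySem.Chars.find (c :: r) sub =
      if PySem.Chars.startswith (c :: r) sub then 0
      else if PySem.Chars.find r sub = -1 then -1 else PySem.Chars.find r sub + 1 := by
  by_cases hp : PySem.Chars.startswith (c :: r) sub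
  · rw [if_pos hp]
    have hpre : sub <+: (c :: r) := (PySem.Chars.startswith_iff _ _).1 hp
    have hinf : sub <:+: (c :: r) := hpre.isInfix
    have h0 : 0 ≤ PySem.Chars.find (c :: r) sub := (PySem.Chars.find_nonneg_iff _ _).2 hinf
    obtain ⟨h1, h2⟩ := PySem.Chars.find_spec h0
    by_contra hne
    have hpos : 0 < (PySem.Chars.find (c :: r) sub).toNat := by omega
    exact h2 0 hpos (by simpa using hpre)
  · rw [if_neg hp]
    have hnp : ¬ sub <+: (c :: r) := fun h => hp ((PySem.Chars.startswith_iff _ _).2 h)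
    by_cases hr : PySem.Chars.find r sub = -1
    · rw [if_pos hr]
      have hninf : ¬ sub <:+: r := (PySem.Chars.find_eq_neg_one_iff _ _).1 hr
      rw [PySem.Chars.find_eq_neg_one_iff]
      intro hinf
      obtain ⟨j, hj⟩ := (pvInfix_drop _ _).1 hinf
      cases j with
      | zero => exact hnp (by simpa using hj)
      | succ j' => exact hninf ((pvInfix_drop _ _).2 ⟨j', by simpa using hj⟩)
    · rw [if_neg hr]
      have hk0 : 0 ≤ PySem.Chars.find r sub := by
        have := PySem.Chars.neg_one_le_find r sub; omega
      obtain ⟨hk1, hk2⟩ := PySem.Chars.find_spec hk0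
      set k := PySem.Chars.find r sub with hkdef
      have hinf : sub <:+: (c :: r) := by
        refine (pvInfix_drop _ _).2 ⟨k.toNat + 1, ?_⟩
        simpa using hk1
      have h0 : 0 ≤ PySem.Chars.find (c :: r) sub := (PySem.Chars.find_nonneg_iff _ _).2 hinf
      obtain ⟨h1, h2⟩ := PySem.Chars.find_spec h0
      set f := PySem.Chars.find (c :: r) sub with hfdef
      have hf0 : f.toNat ≠ 0 := by
        intro h
        exact hnp (by rw [h] at h1; simpa using h1)
      -- f.toNat - 1 is an occurrence in r, so k.toNat ≤ f.toNat - 1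
      have hocc : sub <+: r.drop (f.toNat - 1) := by
        have : (c :: r).drop f.toNat = r.drop (f.toNat - 1) := by
          cases hn : f.toNat with
          | zero => exact absurd hn hf0
          | succ n => simp
        rwa [this] at h1
      have hle : k.toNat ≤ f.toNat - 1 := by
        by_contra hlt
        exact hk2 (f.toNat - 1) (by omega) hocc
      have hge : f.toNat ≤ k.toNat + 1 := by
        by_contra hlt
        exact h2 (k.toNat + 1) (by omega) (by simpa using hk1)
      omega

def pvBad (l : List Char) : Bool :=
  PySem.Chars.startswith l "On ".toList || PySem.Chars.startswith l "From:".toList ||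
  PySem.Chars.startswith l "-----Original Message-----".toList ||
  PySem.Chars.startswith l "> ".toList

def pvP (l : List Char) : Bool := !(PySem.Chars.startswith (PySem.Chars.strip l) ">".toList)

theorem pvStrip_cons_ws (c : Char) (x : List Char) (h : PySem.Chars.isspace c = true) :
    PySem.Chars.strip (c :: x) = PySem.Chars.strip x := by
  simp [PySem.Chars.strip, PySem.Chars.lstrip, List.dropWhile, h]

theorem pvRstrip_snoc_ws (c : Char) (x : List Char) (h : PySem.Chars.isspace c = true) :
    PySem.Chars.rstrip (x ++ [c]) = PySem.Chars.rstrip x := by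
  simp [PySem.Chars.rstrip, h]

theorem pvRstrip_snoc_nws (c : Char) (x : List Char) (h : PySem.Chars.isspace c = false) :
    PySem.Chars.rstrip (x ++ [c]) = x ++ [c] := by
  simp [PySem.Chars.rstrip, h]

theorem pvStrip_snoc_ws (c : Char) (x : List Char) (h : PySem.Chars.isspace c = true) :
    PySem.Chars.strip (x ++ [c]) = PySem.Chars.strip x := by
  induction x with
  | nil => simp [PySem.Chars.strip, PySem.Chars.lstrip, PySem.Chars.rstrip, List.dropWhile, h]
  | cons d y ih =>
    by_cases hd : PySem.Chars.isspace d
    · rw [show (d :: y) ++ [c] = d :: (y ++ [c]) by simp,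
        pvStrip_cons_ws d _ hd, pvStrip_cons_ws d _ hd, ih]
    · have hl : PySem.Chars.lstrip (d :: (y ++ [c])) = d :: (y ++ [c]) := by
        simp [PySem.Chars.lstrip, List.dropWhile, hd]
      have hl2 : PySem.Chars.lstrip (d :: y) = d :: y := by
        simp [PySem.Chars.lstrip, List.dropWhile, hd]
      rw [show (d :: y) ++ [c] = d :: (y ++ [c]) by simp]
      unfold PySem.Chars.strip
      rw [hl, hl2, show d :: (y ++ [c]) = (d :: y) ++ [c] by simp,
        pvRstrip_snoc_ws c _ h]

theorem pvP_nil : pvP [] = true := by rfl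

theorem pvP_cons_ws (c : Char) (l : List Char) (h : PySem.Chars.isspace c = true) :
    pvP (c :: l) = pvP l := by
  simp [pvP, pvStrip_cons_ws c l h]

theorem pvP_snoc_ws (c : Char) (l : List Char) (h : PySem.Chars.isspace c = true) :
    pvP (l ++ [c]) = pvP l := by
  simp [pvP, pvStrip_snoc_ws c l h]

theorem pvJoin_append_singleton (Z : List (List Char)) (w : List Char) (hZ : Z ≠ []) :
    PySem.Chars.join ['\n'] (Z ++ [w]) = PySem.Chars.join ['\n'] Z ++ '\n' :: w := by
  induction Z with
  | nil => exact absurd rfl hZ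
  | cons a Z' ih =>
    cases Z' with
    | nil => simp [PySem.Chars.join_cons_cons, PySem.Chars.join_singleton]
    | cons b Z'' =>
      rw [show (a :: b :: Z'') ++ [w] = a :: ((b :: Z'') ++ [w]) by simp]
      rw [show (b :: Z'') ++ [w] = b :: (Z'' ++ [w]) by simp]
      rw [PySem.Chars.join_cons_cons, PySem.Chars.join_cons_cons]
      rw [show b :: (Z'' ++ [w]) = (b :: Z'') ++ [w] by simp]
      rw [ih (by simp)]
      simp

def pvOut (L : List (List Char)) : List Char :=
  PySem.Chars.strip (PySem.Chars.join ['\n'] (L.filter pvP))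

theorem pvOut_append_nil (X : List (List Char)) : pvOut (X ++ [[]]) = pvOut X := by
  unfold pvOut
  rw [List.filter_append]
  simp only [List.filter, pvP_nil]
  cases hf : X.filter pvP with
  | nil => simp [PySem.Chars.join_singleton, PySem.Chars.join_nil]
  | cons y ys =>
    rw [pvJoin_append_singleton _ _ (by simp)]
    rw [show PySem.Chars.join ['\n'] (y :: ys) ++ '\n' :: [] =
      (PySem.Chars.join ['\n'] (y :: ys)) ++ ['\n'] by simp]
    rw [pvStrip_snoc_ws '\n' _ (by decide)]

theorem pvStrip_join_nil_cons (X : List (List Char)) :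
    PySem.Chars.strip (PySem.Chars.join ['\n'] ([] :: X)) =
      PySem.Chars.strip (PySem.Chars.join ['\n'] X) := by
  cases X with
  | nil => simp [PySem.Chars.join_singleton, PySem.Chars.join_nil]
  | cons y ys =>
    rw [PySem.Chars.join_cons_cons]
    simp only [List.nil_append]
    rw [show (['\n'] : List Char) ++ PySem.Chars.join ['\n'] (y :: ys) =
      ('\n' : Char) :: PySem.Chars.join ['\n'] (y :: ys) by simp]
    exact pvStrip_cons_ws '\n' _ (by decide)

theorem pvOut_cons_ws (c : Char) (r : List Char) (h : PySem.Chars.isspace c = true) :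
    pvOut (pvSplit (c :: r)) = pvOut (pvSplit r) := by
  by_cases hc : c = '\n'
  · subst hc
    show pvOut (([], (pvSplitP r).1 :: (pvSplitP r).2).1 :: ([], (pvSplitP r).1 :: (pvSplitP r).2).2) = _
    unfold pvOut
    simp only [List.filter, pvP_nil]
    exact pvStrip_join_nil_cons _
  · have hsp : pvSplit (c :: r) = (c :: (pvSplitP r).1) :: (pvSplitP r).2 := by
      simp [pvSplit, pvSplitP, hc]
    rw [hsp]
    unfold pvOut
    show PySem.Chars.strip (PySem.Chars.join ['\n']
      (List.filter pvP ((c :: (pvSplitP r).1) :: (pvSplitP r).2))) = _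
    simp only [pvSplit, List.filter, pvP_cons_ws c _ h]
    cases hP : pvP (pvSplitP r).1
    · simp
    · simp only []
      cases htl : List.filter pvP (pvSplitP r).2 with
      | nil => simp [PySem.Chars.join_singleton, pvStrip_cons_ws c _ h]
      | cons y ys =>
        rw [PySem.Chars.join_cons_cons, PySem.Chars.join_cons_cons]
        rw [show (c :: (pvSplitP r).1) ++ ['\n'] ++ PySem.Chars.join ['\n'] (y :: ys) =
          c :: ((pvSplitP r).1 ++ ['\n'] ++ PySem.Chars.join ['\n'] (y :: ys)) by simp]
        exact pvStrip_cons_ws c _ h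

def pvModLast (c : Char) : List (List Char) → List (List Char)
  | [] => []
  | [x] => [x ++ [c]]
  | x :: y :: ys => x :: pvModLast c (y :: ys)

theorem pvSplitP_snoc (c : Char) (v : List Char) :
    pvSplitP (v ++ [c]) =
      if c = '\n' then ((pvSplitP v).1, (pvSplitP v).2 ++ [[]])
      else if (pvSplitP v).2.isEmpty then ((pvSplitP v).1 ++ [c], [])
      else ((pvSplitP v).1, pvModLast c (pvSplitP v).2) := by
  induction v with
  | nil =>
    by_cases hc : c = '\n' <;> simp [pvSplitP, hc]
  | cons d w ih =>
    rw [show (d :: w) ++ [c] = d :: (w ++ [c]) by simp]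
    by_cases hd : d = '\n'
    · simp only [pvSplitP, hd, ih]
      by_cases hc : c = '\n'
      · simp [hc]
      · rw [if_neg hc, if_neg hc]
        cases h2 : (pvSplitP w).2 with
        | nil => simp [pvModLast]
        | cons a as =>
          simp only [List.isEmpty_cons]
          simp [pvModLast]
    · simp only [pvSplitP, if_neg hd, ih]
      by_cases hc : c = '\n'
      · simp [hc]
      · rw [if_neg hc, if_neg hc]
        cases h2 : (pvSplitP w).2 with
        | nil => simp
        | cons a as => simp

theorem pvModLast_concat (c : Char) (Q : List (List Char)) (b : List Char) :
    pvModLast c (Q ++ [b]) = Q ++ [b ++ [c]] := by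
  induction Q with
  | nil => rfl
  | cons a Q' ih =>
    cases Q' with
    | nil => simp [pvModLast]
    | cons d Q'' => simpa [pvModLast] using ih

theorem pvOut_modLast (c : Char) (h : PySem.Chars.isspace c = true) :
    ∀ (X : List (List Char)), X ≠ [] → pvOut (pvModLast c X) = pvOut X := by
  intro X hX
  rcases List.eq_nil_or_concat X with rfl | ⟨Q, b, rfl⟩
  · exact absurd rfl hX
  · rw [List.concat_eq_append, pvModLast_concat]
    unfold pvOut
    rw [List.filter_append, List.filter_append]
    simp only [List.filter, pvP_snoc_ws c b h]
    cases hP : pvP b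
    · simp
    · simp only []
      cases hf : Q.filter pvP with
      | nil =>
        simp only [List.nil_append]
        simp [PySem.Chars.join_singleton, pvStrip_snoc_ws c b h]
      | cons y ys =>
        rw [pvJoin_append_singleton _ _ (by simp), pvJoin_append_singleton _ _ (by simp)]
        rw [show PySem.Chars.join ['\n'] (y :: ys) ++ '\n' :: (b ++ [c]) =
          (PySem.Chars.join ['\n'] (y :: ys) ++ '\n' :: b) ++ [c] by simp]
        exact pvStrip_snoc_ws c _ h

theorem pvOut_snoc_ws (c : Char) (v : List Char) (h : PySem.Chars.isspace c = true) :
    pvOut (pvSplit (v ++ [c])) = pvOut (pvSplit v) := by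
  unfold pvSplit
  rw [pvSplitP_snoc]
  by_cases hc : c = '\n'
  · rw [if_pos hc]
    show pvOut ((pvSplitP v).1 :: ((pvSplitP v).2 ++ [[]])) = _
    rw [show (pvSplitP v).1 :: ((pvSplitP v).2 ++ [[]]) =
      ((pvSplitP v).1 :: (pvSplitP v).2) ++ [[]] by simp]
    exact pvOut_append_nil _
  · rw [if_neg hc]
    cases h2 : (pvSplitP v).2 with
    | nil =>
      simp only [List.isEmpty_nil, if_pos]
      show pvOut [(pvSplitP v).1 ++ [c]] = pvOut [(pvSplitP v).1]
      unfold pvOut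
      simp only [List.filter, pvP_snoc_ws c _ h]
      cases hP : pvP (pvSplitP v).1
      · simp
      · simp [PySem.Chars.join_singleton, pvStrip_snoc_ws c _ h]
    | cons a as =>
      simp only [List.isEmpty_cons, Bool.false_eq_true, if_false]
      show pvOut ((pvSplitP v).1 :: pvModLast c (a :: as)) = pvOut ((pvSplitP v).1 :: a :: as)
      rw [show (pvSplitP v).1 :: pvModLast c (a :: as) =
        pvModLast c ((pvSplitP v).1 :: a :: as) from rfl]
      exact pvOut_modLast c h _ (by simp)

theorem pvOut_lstrip (v : List Char) :
    pvOut (pvSplit (PySem.Chars.lstrip v)) = pvOut (pvSplit v) := by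
  induction v with
  | nil => rfl
  | cons c r ih =>
    by_cases hc : PySem.Chars.isspace c
    · rw [show PySem.Chars.lstrip (c :: r) = PySem.Chars.lstrip r by
        simp [PySem.Chars.lstrip, List.dropWhile, hc]]
      rw [ih, pvOut_cons_ws c r hc]
    · rw [show PySem.Chars.lstrip (c :: r) = c :: r by
        simp [PySem.Chars.lstrip, List.dropWhile, hc]]

theorem pvOut_rstrip (v : List Char) :
    pvOut (pvSplit (PySem.Chars.rstrip v)) = pvOut (pvSplit v) := by
  induction v using List.reverseRecOn with
  | nil => rfl
  | append_singleton w c ih =>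
    by_cases hc : PySem.Chars.isspace c
    · rw [pvRstrip_snoc_ws c w hc, ih, pvOut_snoc_ws c w hc]
    · rw [pvRstrip_snoc_nws c w (by simpa using hc)]

theorem pvOut_strip (v : List Char) :
    pvOut (pvSplit (PySem.Chars.strip v)) = pvOut (pvSplit v) := by
  unfold PySem.Chars.strip
  rw [pvOut_rstrip, pvOut_lstrip]

def pvStartsAny (r : List Char) : Bool :=
  PySem.Chars.startswith r "On ".toList || PySem.Chars.startswith r "\nOn ".toList ||
  PySem.Chars.startswith r "> ".toList || PySem.Chars.startswith r "From:".toList ||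
  PySem.Chars.startswith r "-----Original Message-----".toList

def pvMinPos : List Char → Nat
  | [] => 0
  | c :: r => if c = '\n' && pvStartsAny r then 0 else pvMinPos r + 1

def pvStep (a p : Int) : Int := if p ≠ -1 ∧ p < a then p else a

theorem pvStep_nonneg (a p : Int) (ha : 0 ≤ a) (hp : -1 ≤ p) : 0 ≤ pvStep a p := by
  unfold pvStep; split_ifs with h
  · omega
  · omega

theorem pvStep_shift (a p : Int) (ha : 0 ≤ a) (hp : -1 ≤ p) :
    pvStep (a + 1) (if p = -1 then -1 else p + 1) = pvStep a p + 1 := by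
  unfold pvStep; split_ifs <;> omega

theorem pvChain_zero (a v1 v2 v3 v4 v5 : Int) (ha : 0 ≤ a)
    (h1 : -1 ≤ v1) (h2 : -1 ≤ v2) (h3 : -1 ≤ v3) (h4 : -1 ≤ v4) (h5 : -1 ≤ v5)
    (hz : v1 = 0 ∨ v2 = 0 ∨ v3 = 0 ∨ v4 = 0 ∨ v5 = 0) :
    pvStep (pvStep (pvStep (pvStep (pvStep a v1) v2) v3) v4) v5 = 0 := by
  unfold pvStep
  split_ifs <;> omega

theorem pvChain_shift (a k1 k2 k3 k4 k5 : Int) (ha : 0 ≤ a)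
    (h1 : -1 ≤ k1) (h2 : -1 ≤ k2) (h3 : -1 ≤ k3) (h4 : -1 ≤ k4) (h5 : -1 ≤ k5) :
    pvStep (pvStep (pvStep (pvStep (pvStep (a + 1) (if k1 = -1 then -1 else k1 + 1))
        (if k2 = -1 then -1 else k2 + 1)) (if k3 = -1 then -1 else k3 + 1))
        (if k4 = -1 then -1 else k4 + 1)) (if k5 = -1 then -1 else k5 + 1) =
      pvStep (pvStep (pvStep (pvStep (pvStep a k1) k2) k3) k4) k5 + 1 := by
  have n1 := pvStep_nonneg a k1 ha h1
  have n2 := pvStep_nonneg _ k2 n1 h2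
  have n3 := pvStep_nonneg _ k3 n2 h3
  have n4 := pvStep_nonneg _ k4 n3 h4
  rw [pvStep_shift _ _ ha h1, pvStep_shift _ _ n1 h2, pvStep_shift _ _ n2 h3,
    pvStep_shift _ _ n3 h4, pvStep_shift _ _ n4 h5]

theorem pvFold_eq (s : List Char) :
    pvStep (pvStep (pvStep (pvStep (pvStep (s.length : Int)
      (PySem.Chars.find s "\nOn ".toList))
      (PySem.Chars.find s "\n\nOn ".toList))
      (PySem.Chars.find s "\n> ".toList))
      (PySem.Chars.find s "\nFrom:".toList))
      (PySem.Chars.find s "\n-----Original Message-----".toList) = (pvMinPos s : Int) := by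
  induction s with
  | nil => decide
  | cons c r ih =>
    have e1 : ("\nOn " : String).toList = '\n' :: "On ".toList := rfl
    have e2 : ("\n\nOn " : String).toList = '\n' :: "\nOn ".toList := rfl
    have e3 : ("\n> " : String).toList = '\n' :: "> ".toList := rfl
    have e4 : ("\nFrom:" : String).toList = '\n' :: "From:".toList := rfl
    have e5 : ("\n-----Original Message-----" : String).toList =
      '\n' :: "-----Original Message-----".toList := rfl
    have hsw : ∀ (t : List Char), PySem.Chars.startswith (c :: r) ('\n' :: t) =
        (decide (c = '\n') && PySem.Chars.startswith r t) := by
      intro t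
      simp only [PySem.Chars.startswith, List.isPrefixOf]
      rw [show ('\n' == c) = decide (c = '\n') by
        by_cases hc : c = '\n'
        · simp [hc]
        · simp only [hc, decide_false]
          simp
          exact fun h => hc h.symm]
    rw [e1, e2, e3, e4, e5,
      pvFind_cons c r ('\n' :: "On ".toList),
      pvFind_cons c r ('\n' :: "\nOn ".toList),
      pvFind_cons c r ('\n' :: "> ".toList),
      pvFind_cons c r ('\n' :: "From:".toList),
      pvFind_cons c r ('\n' :: "-----Original Message-----".toList),
      hsw, hsw, hsw, hsw, hsw]
    rw [← e1, ← e2, ← e3, ← e4, ← e5]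
    have hb1 := PySem.Chars.neg_one_le_find r "\nOn ".toList
    have hb2 := PySem.Chars.neg_one_le_find r "\n\nOn ".toList
    have hb3 := PySem.Chars.neg_one_le_find r "\n> ".toList
    have hb4 := PySem.Chars.neg_one_le_find r "\nFrom:".toList
    have hb5 := PySem.Chars.neg_one_le_find r "\n-----Original Message-----".toList
    have hl0 : (0 : Int) ≤ (r.length : Int) := Int.natCast_nonneg _
    have hlen : (((c :: r).length : Nat) : Int) = (r.length : Int) + 1 := by
      push_cast [List.length_cons]; ring
    by_cases hc : c = '\n'
    · have hd : decide (c = '\n') = true := by simp [hc]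
      simp only [hd, Bool.true_and]
      by_cases hA : pvStartsAny r = true
      · have hA' := hA
        simp only [pvStartsAny, Bool.or_eq_true] at hA'
        refine Eq.trans (pvChain_zero _ _ _ _ _ _ (by omega)
          (by split_ifs <;> omega) (by split_ifs <;> omega) (by split_ifs <;> omega)
          (by split_ifs <;> omega) (by split_ifs <;> omega) ?_) ?_
        · rcases hA' with (((h | h) | h) | h) | h
          · exact Or.inl (if_pos h)
          · exact Or.inr (Or.inl (if_pos h))
          · exact Or.inr (Or.inr (Or.inl (if_pos h)))
          · exact Or.inr (Or.inr (Or.inr (Or.inl (if_pos h))))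
          · exact Or.inr (Or.inr (Or.inr (Or.inr (if_pos h))))
        · simp [pvMinPos, hc, hA]
      · have hA' : pvStartsAny r = false := by simpa using hA
        simp only [pvStartsAny, Bool.or_eq_false_iff] at hA'
        obtain ⟨⟨⟨⟨g1, g2⟩, g3⟩, g4⟩, g5⟩ := hA'
        simp only [g1, g2, g3, g4, g5, Bool.false_eq_true, if_false]
        rw [hlen, pvChain_shift _ _ _ _ _ _ hl0 hb1 hb2 hb3 hb4 hb5, ih]
        have : pvMinPos (c :: r) = pvMinPos r + 1 := by
          simp [pvMinPos, hc, hA]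
        rw [this]; push_cast; ring
    · have hd : decide (c = '\n') = false := by simp [hc]
      simp only [hd, Bool.false_and, Bool.false_eq_true, if_false]
      rw [hlen, pvChain_shift _ _ _ _ _ _ hl0 hb1 hb2 hb3 hb4 hb5, ih]
      have : pvMinPos (c :: r) = pvMinPos r + 1 := by
        simp [pvMinPos, hc]
      rw [this]; push_cast; ring

def pvKeep : List (List Char) → List (List Char)
  | [] => []
  | l :: ls => l :: ls.takeWhile (fun x => !pvBad x)

theorem pvHead_pref (m r : List Char) (hm : ∀ c ∈ m, c ≠ '\n') :
    PySem.Chars.startswith r m = PySem.Chars.startswith ((pvSplitP r).1) m := by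
  simp only [PySem.Chars.startswith, pvSplitP_fst]
  exact pvPrefix_takeWhile m r hm

theorem pvNoNl (m : List Char) (h : m.all (fun c => !(c == '\n')) = true) :
    ∀ c ∈ m, c ≠ '\n' := by
  intro c hc
  have := List.all_eq_true.mp h c hc
  simpa using this

theorem pvBad_head (r : List Char) :
    pvBad ((pvSplitP r).1) =
      (PySem.Chars.startswith r "On ".toList || PySem.Chars.startswith r "From:".toList ||
       PySem.Chars.startswith r "-----Original Message-----".toList ||
       PySem.Chars.startswith r "> ".toList) := by
  unfold pvBad
  rw [← pvHead_pref _ r (pvNoNl _ (by rfl)), ← pvHead_pref _ r (pvNoNl _ (by rfl)),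
    ← pvHead_pref _ r (pvNoNl _ (by rfl)), ← pvHead_pref _ r (pvNoNl _ (by rfl))]

theorem pvBad_nil : pvBad [] = false := by rfl

theorem pvTake_keep (s : List Char) :
    pvSplit (s.take (pvMinPos s)) = pvKeep (pvSplit s) ∨
    pvSplit (s.take (pvMinPos s)) ++ [[]] = pvKeep (pvSplit s) := by
  induction s with
  | nil => left; rfl
  | cons c r ih =>
    by_cases hc : c = '\n'
    · by_cases hA : pvStartsAny r = true
      · -- hit: A truncates to nothing before this newline
        have hmin : pvMinPos (c :: r) = 0 := by simp [pvMinPos, hc, hA]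
        rw [hmin, List.take_zero]
        have hsp : pvSplit (c :: r) = [] :: pvSplit r := by
          simp [pvSplit, pvSplitP, hc]
        rw [hsp]
        show _ ∨ _
        by_cases hbad : pvBad ((pvSplitP r).1) = true
        · left
          show pvSplit [] = [] :: List.takeWhile _ (pvSplit r)
          rw [show pvSplit r = (pvSplitP r).1 :: (pvSplitP r).2 from rfl]
          rw [List.takeWhile_cons_of_neg (by simp [hbad])]
          rfl
        · -- only the "\n\nOn " marker can have fired
          have hA' := hA
          simp only [pvStartsAny, Bool.or_eq_true] at hA'
          rw [pvBad_head] at hbad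
          have h2 : PySem.Chars.startswith r "\nOn ".toList = true := by
            rcases hA' with (((h | h) | h) | h) | h
            · exact absurd (by rw [h]; simp) hbad
            · exact h
            · exact absurd (by rw [h]; simp) hbad
            · exact absurd (by rw [h]; simp) hbad
            · exact absurd (by rw [h]; simp) hbad
          obtain ⟨r', rfl, hOn⟩ : ∃ r', r = '\n' :: r' ∧
              PySem.Chars.startswith r' "On ".toList = true := by
            cases r with
            | nil => exact absurd h2 (by decide)
            | cons d r' =>
              rw [show ("\nOn " : String).toList = '\n' :: "On ".toList from rfl] at h2
              simp only [PySem.Chars.startswith, List.isPrefixOf, Bool.and_eq_true,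
                beq_iff_eq] at h2
              refine ⟨r', ?_, ?_⟩
              · rw [← h2.1]
              · simp only [PySem.Chars.startswith]
                exact h2.2
          right
          show pvSplit [] ++ [[]] = [] :: List.takeWhile _ (pvSplit ('\n' :: r'))
          have hsp' : pvSplit ('\n' :: r') = [] :: pvSplit r' := by
            simp [pvSplit, pvSplitP]
          rw [hsp']
          rw [List.takeWhile_cons_of_pos (by simp [pvBad_nil])]
          rw [show pvSplit r' = (pvSplitP r').1 :: (pvSplitP r').2 from rfl]
          have hbad' : pvBad ((pvSplitP r').1) = true := by
            rw [pvBad_head, hOn]; simp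
          rw [List.takeWhile_cons_of_neg (by simp [hbad'])]
          rfl
      · -- newline but no marker after it
        have hmin : pvMinPos (c :: r) = pvMinPos r + 1 := by simp [pvMinPos, hc, hA]
        rw [hmin, List.take_succ_cons]
        have hsp1 : pvSplit (c :: r.take (pvMinPos r)) = [] :: pvSplit (r.take (pvMinPos r)) := by
          simp [pvSplit, pvSplitP, hc]
        have hsp2 : pvSplit (c :: r) = [] :: pvSplit r := by
          simp [pvSplit, pvSplitP, hc]
        rw [hsp1, hsp2]
        have hA' : pvStartsAny r = false := by simpa using hA
        simp only [pvStartsAny, Bool.or_eq_false_iff] at hA'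
        have hbad : pvBad ((pvSplitP r).1) = false := by
          rw [pvBad_head, hA'.1.1.1.1, hA'.1.1.2, hA'.1.2, hA'.2]
          rfl
        have hkeep : List.takeWhile (fun x => !pvBad x) (pvSplit r) = pvKeep (pvSplit r) := by
          rw [show pvSplit r = (pvSplitP r).1 :: (pvSplitP r).2 from rfl]
          rw [List.takeWhile_cons_of_pos (by simp [hbad])]
          rfl
        show _ ∨ _
        rcases ih with h | h
        · left
          show [] :: pvSplit (r.take (pvMinPos r)) = [] :: _
          rw [hkeep, ← h]
        · right
          show ([] :: pvSplit (r.take (pvMinPos r))) ++ [[]] = [] :: _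
          rw [hkeep, ← h]
          simp
    · -- ordinary character: both sides extend the current line
      have hmin : pvMinPos (c :: r) = pvMinPos r + 1 := by simp [pvMinPos, hc]
      rw [hmin, List.take_succ_cons]
      have hsp1 : pvSplit (c :: r.take (pvMinPos r)) =
          (c :: (pvSplitP (r.take (pvMinPos r))).1) :: (pvSplitP (r.take (pvMinPos r))).2 := by
        simp [pvSplit, pvSplitP, hc]
      have hsp2 : pvSplit (c :: r) = (c :: (pvSplitP r).1) :: (pvSplitP r).2 := by
        simp [pvSplit, pvSplitP, hc]
      rw [hsp1, hsp2]
      have hkeep : pvKeep ((c :: (pvSplitP r).1) :: (pvSplitP r).2) =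
          (c :: (pvSplitP r).1) :: List.takeWhile (fun x => !pvBad x) (pvSplitP r).2 := rfl
      rw [hkeep]
      rcases ih with h | h
      · left
        have h' : (pvSplitP (r.take (pvMinPos r))).1 = (pvSplitP r).1 ∧
            (pvSplitP (r.take (pvMinPos r))).2 =
              List.takeWhile (fun x => !pvBad x) (pvSplitP r).2 := by
          have := h
          simp only [pvSplit, pvKeep, List.cons.injEq] at this
          exact this
        rw [h'.1, h'.2]
      · right
        have h' : (pvSplitP (r.take (pvMinPos r))).1 = (pvSplitP r).1 ∧
            (pvSplitP (r.take (pvMinPos r))).2 ++ [[]] =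
              List.takeWhile (fun x => !pvBad x) (pvSplitP r).2 := by
          have := h
          simp only [pvSplit, pvKeep, List.cons_append, List.cons.injEq] at this
          exact this
        rw [← h'.1, ← h'.2]
        simp

theorem pvIsMarkerLine_ofList (l : List Char) : pvIsMarkerLine (String.ofList l) = pvBad l := by
  simp [pvIsMarkerLine, pvBad]

theorem pvKeptLine_ofList (l : List Char) : pvKeptLine (String.ofList l) = pvP l := by
  simp [pvKeptLine, pvP]

theorem pvWalk_eq (ls : List (List Char)) :
    pvWalk (ls.map String.ofList) =
      ((ls.takeWhile (fun x => !pvBad x)).filter pvP).map String.ofList := by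
  induction ls with
  | nil => rfl
  | cons l rest ih =>
    show pvWalk (String.ofList l :: rest.map String.ofList) = _
    unfold pvWalk
    rw [pvIsMarkerLine_ofList, pvKeptLine_ofList]
    cases hb : pvBad l
    · rw [List.takeWhile_cons_of_pos (by simp [hb])]
      simp only [List.filter, Bool.false_eq_true, if_false]
      cases hP : pvP l
      · simpa using ih
      · simpa using congrArg (String.ofList l :: ·) ih
    · rw [List.takeWhile_cons_of_neg (by simp [hb])]
      simp

theorem pvSplitQ (cs : String) :
    (PySem.Str.split? cs "\n").getD [] = (pvSplit cs.toList).map String.ofList := by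
  unfold PySem.Str.split?
  rw [show ("\n" : String).toList = ['\n'] from rfl]
  unfold PySem.Chars.split?
  simp [pvSplit_eq]

theorem pvStrJoinStrip (K : List (List Char)) :
    PySem.Str.strip (PySem.Str.join "\n" (K.map String.ofList)) =
      String.ofList (PySem.Chars.strip (PySem.Chars.join ['\n'] K)) := by
  apply String.toList_inj.mp
  rw [PySem.Str.toList_strip, PySem.Str.toList_join, String.toList_ofList, List.map_map]
  rw [show String.toList ∘ String.ofList = (id : List Char → List Char) by
    funext l; simp]
  rw [List.map_id]
  exact String.toList_ofList.symm

theorem pvAlt_eq (cs : String) :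
    extract_latest_message_py_alt cs = String.ofList (pvOut (pvKeep (pvSplit cs.toList))) := by
  unfold extract_latest_message_py_alt
  rw [pvSplitQ]
  rw [show pvSplit cs.toList = (pvSplitP cs.toList).1 :: (pvSplitP cs.toList).2 from rfl]
  simp only [List.map]
  rw [pvWalk_eq, pvKeptLine_ofList]
  have hkept : (if pvP (pvSplitP cs.toList).1 = true then [String.ofList (pvSplitP cs.toList).1] else []) ++
      (((pvSplitP cs.toList).2.takeWhile (fun x => !pvBad x)).filter pvP).map String.ofList =
      ((pvKeep ((pvSplitP cs.toList).1 :: (pvSplitP cs.toList).2)).filter pvP).map String.ofList := by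
    show _ = (((pvSplitP cs.toList).1 :: ((pvSplitP cs.toList).2.takeWhile (fun x => !pvBad x))).filter pvP).map String.ofList
    simp only [List.filter]
    cases hP : pvP (pvSplitP cs.toList).1
    · simp
    · simp
  rw [hkept]
  rw [pvStrJoinStrip]
  rfl

theorem pvFilter_map_ofList (L : List (List Char)) :
    (L.map String.ofList).filter (fun line => !(PySem.Str.startswith (PySem.Str.strip line) ">")) =
      (L.filter pvP).map String.ofList := by
  induction L with
  | nil => rfl
  | cons l ls ih =>
    simp only [List.map, List.filter]
    have : (!(PySem.Str.startswith (PySem.Str.strip (String.ofList l)) ">")) = pvP l := by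
      simp [pvP]
    rw [this]
    cases hP : pvP l
    · simpa using ih
    · simpa using congrArg (String.ofList l :: ·) ih

theorem pvA_eq (cs : String) :
    extract_latest_message_py cs =
      String.ofList (pvOut (pvSplit (PySem.Chars.strip (cs.toList.take (pvMinPos cs.toList))))) := by
  unfold extract_latest_message_py
  simp only [List.foldl]
  rw [PySem.Str.len_eq]
  simp only [PySem.Str.find_eq]
  have hfold : pvStep (pvStep (pvStep (pvStep (pvStep ((cs.toList.length : Nat) : Int)
      (PySem.Chars.find cs.toList "\nOn ".toList))
      (PySem.Chars.find cs.toList "\n\nOn ".toList))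
      (PySem.Chars.find cs.toList "\n> ".toList))
      (PySem.Chars.find cs.toList "\nFrom:".toList))
      (PySem.Chars.find cs.toList "\n-----Original Message-----".toList) = (pvMinPos cs.toList : Int) :=
    pvFold_eq cs.toList
  unfold pvStep at hfold
  rw [hfold]
  have hslice : PySem.Str.slice cs none (some ((pvMinPos cs.toList : Nat) : Int)) =
      String.ofList (cs.toList.take (pvMinPos cs.toList)) := by
    apply String.toList_inj.mp
    rw [PySem.Str.toList_slice]
    show PySem.List.slice cs.toList none (some ((pvMinPos cs.toList : Nat) : Int)) = _
    rw [PySem.List.slice_to cs.toList (show (0:Int) ≤ ((pvMinPos cs.toList : Nat) : Int) from Int.natCast_nonneg _)]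
    simp
  rw [hslice]
  have hstrip : PySem.Str.strip (String.ofList (cs.toList.take (pvMinPos cs.toList))) =
      String.ofList (PySem.Chars.strip (cs.toList.take (pvMinPos cs.toList))) := by
    apply String.toList_inj.mp
    simp [PySem.Str.toList_strip]
  rw [hstrip]
  rw [pvSplitQ]
  rw [show (String.ofList (PySem.Chars.strip (cs.toList.take (pvMinPos cs.toList)))).toList =
    PySem.Chars.strip (cs.toList.take (pvMinPos cs.toList)) by simp]
  rw [pvFilter_map_ofList]
  rw [pvStrJoinStrip]
  rfl

set_option maxHeartbeats 1000000 in
theorem pvMain (cs : String) : extract_latest_message_py cs = extract_latest_message_py_alt cs := by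
  rw [pvA_eq, pvAlt_eq, pvOut_strip]
  rcases pvTake_keep cs.toList with h | h
  · rw [h]
  · rw [← h, pvOut_append_nil]

-- ===== VERDICT (by name: the statement is the Claim_ definition above) =====
theorem extract_latest_message_py_spec : Claim_equal_extract_latest_message_py := by
  intro cs _
  unfold Spec_extract_latest_message_py
  exact pvMain cs
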